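-- pv_equiv track=rewrite | github.com/zoonwooooo/bj-online-code | Silver/silver4 10815.py | fuct
-- ===== SOURCE A (Python) =====
-- def fuct(target,data):
--     start=0
--     end=len(data)-1
--     while start<=end:
--         mid= (start + end)//2
--         if target==data[mid]:
--             return 1
--         elif target > data[mid]:
--             start=mid+1
--         elif target < data[mid]:
--             end=mid-1
--     return 0
-- ===== SOURCE B (Python) =====
-- def fuct(target, data):
--     if not data:
--         return 0
--     mid = (len(data) - 1) // 2
--     if target == data[mid]:
--         return 1
--     if target > data[mid]:
--         return fuct(target, data[mid+1:])
--     return fuct(target, data[:mid])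
-- ===== Notes on version B (the rewrite author's own statement) =====
-- stated objective: alternative
-- what changed: Replaced the index-pair while loop by a recursive divide-and-conquer on list slices (empty slice -> 0, compare the middle element, recurse on the half-slice), which probes the same elements in the same order.
import Mathlib
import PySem

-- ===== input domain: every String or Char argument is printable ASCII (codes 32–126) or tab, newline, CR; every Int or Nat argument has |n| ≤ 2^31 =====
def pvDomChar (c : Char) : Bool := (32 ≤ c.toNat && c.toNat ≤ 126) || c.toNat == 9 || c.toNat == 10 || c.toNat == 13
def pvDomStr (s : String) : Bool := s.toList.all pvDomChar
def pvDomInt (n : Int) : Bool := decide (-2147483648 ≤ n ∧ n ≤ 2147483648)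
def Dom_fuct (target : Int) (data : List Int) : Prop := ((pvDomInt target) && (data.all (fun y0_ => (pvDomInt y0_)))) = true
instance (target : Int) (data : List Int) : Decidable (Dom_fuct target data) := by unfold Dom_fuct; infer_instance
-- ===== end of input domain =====

-- B replaces A's index-pair while loop by recursive divide-and-conquer on list slices
-- (same probe sequence, hence equal on all inputs, sorted or not); objective: alternative.


-- ===== PORT A =====
-- while start<=end: mid=(start+end)//2; compare; move start or end.
-- data[mid] is provably in range whenever the loop runs (0 ≤ start ≤ mid ≤ end < len),
-- so pyGet? always returns some; .getD 0 is never taken on the none branch.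
def fuctLoop (target : Int) (data : List Int) (start end_ : Int) : Int :=
  if h : start ≤ end_ then
    let mid := PySem.Int.floordiv (start + end_) 2
    let x := (PySem.List.pyGet? data mid).getD 0
    if target = x then 1
    else if target > x then fuctLoop target data (mid + 1) end_
    else fuctLoop target data start (mid - 1)
  else 0
termination_by (end_ + 1 - start).toNat
decreasing_by
  · have := PySem.Int.floordiv_two_mid_bounds h
    omega
  · have := PySem.Int.floordiv_two_mid_bounds h
    omega

def fuct (target : Int) (data : List Int) : Int :=
  fuctLoop target data 0 ((data.length : Int) - 1)

-- ===== PORT B =====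
-- mid = (len(data)-1)//2 : len ≥ 1 here, so Python's floor division equals Nat division;
-- data[mid] is in range (mid < len), so getD's default is never used;
-- data[mid+1:] = data.drop (mid+1) and data[:mid] = data.take mid (nonnegative bounds).
def fuct_alt (target : Int) (data : List Int) : Int :=
  if data = [] then 0
  else
    let mid : Nat := (data.length - 1) / 2
    let x := data.getD mid 0
    if target = x then 1
    else if target > x then fuct_alt target (data.drop (mid + 1))
    else fuct_alt target (data.take mid)
termination_by data.length
decreasing_by
  · rename_i hne _ _
    have : data.length ≠ 0 := fun h0 => hne (List.eq_nil_of_length_eq_zero h0)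
    simp only [List.length_drop]
    omega
  · rename_i hne _ _
    have : data.length ≠ 0 := fun h0 => hne (List.eq_nil_of_length_eq_zero h0)
    simp only [List.length_take]
    omega

-- ===== PRECONDITION & SPEC =====
def Spec_fuct (target : Int) (data : List Int) (out : Int) : Prop := out = fuct_alt target data
instance (target : Int) (data : List Int) (out : Int) : Decidable (Spec_fuct target data out) := by unfold Spec_fuct; infer_instance

-- ===== CLAIM (what is proved, stated in full; the proofs are below) =====
def Claim_equal_fuct : Prop := ∀ (target : Int) (data : List Int), Dom_fuct target data → Spec_fuct target data (fuct target data)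

-- ===== LEMMAS AND PROOFS =====

lemma loop_eq (target : Int) (data : List Int) :
    ∀ (n : Nat) (start end_ : Int), (end_ + 1 - start).toNat = n → 0 ≤ start →
      end_ < (data.length : Int) →
      fuctLoop target data start end_ = fuct_alt target ((data.drop start.toNat).take n) := by
  intro n
  induction n using Nat.strong_induction_on with
  | _ n IH =>
    intro start end_ hn hs he
    rw [fuctLoop]
    by_cases hse : start ≤ end_
    · have hn1 : 1 ≤ n := by omega
      have hend : end_ = start + (n : Int) - 1 := by omega
      have hmb := PySem.Int.floordiv_two_mid_bounds hse
      have hfd : PySem.Int.floordiv (start + end_) 2 = (start + end_) / 2 :=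
        PySem.Int.floordiv_eq_ediv_of_pos (by norm_num)
      set mid := PySem.Int.floordiv (start + end_) 2 with hmiddef
      set midB : Nat := (n - 1) / 2 with hmidB
      have hmid : mid = start + (midB : Int) := by rw [hfd]; omega
      have hmbn : midB < n := by omega
      have hlen : start.toNat + n ≤ data.length := by omega
      set r := (data.drop start.toNat).take n with hr
      have hrlen : r.length = n := by
        simp only [hr, List.length_take, List.length_drop]; omega
      have hrne : r ≠ [] := by
        intro h0; rw [h0] at hrlen; simp at hrlen; omega
      have hidx : mid.toNat = start.toNat + midB := by omega
      have hbound : start.toNat + midB < data.length := by omega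
      have hm0 : (0 : Int) ≤ mid := by omega
      have hx : (PySem.List.pyGet? data mid).getD 0 = r.getD midB 0 := by
        rw [PySem.List.pyGet?_of_nonneg data hm0, hidx]
        have hget : r[midB]? = data[start.toNat + midB]? := by
          rw [hr, List.getElem?_take_of_lt hmbn, List.getElem?_drop]
        simp only [List.getD, hget]
      rw [dif_pos hse]
      conv_rhs => rw [fuct_alt]
      rw [if_neg hrne]
      simp only [hrlen, ← hmidB, ← hx]
      by_cases h1 : target = (PySem.List.pyGet? data mid).getD 0
      · rw [if_pos h1, if_pos h1]
      · rw [if_neg h1, if_neg h1]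
        by_cases h2 : target > (PySem.List.pyGet? data mid).getD 0
        · rw [if_pos h2, if_pos h2]
          have hIH := IH (n - (midB + 1)) (by omega) (mid + 1) end_ (by omega) (by omega) he
          rw [hIH]
          have hix : (mid + 1).toNat = midB + 1 + start.toNat := by omega
          rw [hr, List.drop_take, List.drop_drop, hix, Nat.add_comm (midB + 1) start.toNat]
        · rw [if_neg h2, if_neg h2]
          have hIH := IH midB hmbn start (mid - 1) (by omega) hs (by omega)
          rw [hIH]
          rw [hr, List.take_take, min_eq_left (by omega)]
    · have hn0 : n = 0 := by omega
      rw [dif_neg hse, hn0]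
      rw [fuct_alt]
      simp

-- ===== VERDICT (by name: the statement is the Claim_ definition above) =====
theorem fuct_spec : Claim_equal_fuct := by
  intro target data _
  unfold Spec_fuct fuct
  have h := loop_eq target data data.length 0 ((data.length : Int) - 1) (by omega) (by omega) (by omega)
  simpa using h
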